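-- pv_equiv track=rewrite | github.com/gongyh/NannoEpiCode | Nuclesome_occupancy/mergedReplicate/deepTools/plotHeatmap/count_nucleosomes_2k.py | count_summits
-- ===== SOURCE A (Python) =====
-- def count_summits(start, end, summits, interval=1000, step=10):
--     if start > end:
--         step = -step
--     counts = []
--     for i in range(start,end,step):
--         frag_start = i-1000
--         frag_end = i+1000
--         count = 0
--         for st in summits:
--             if st>frag_start and st<frag_end:
--                 count += 1
--         counts.append(count)
--     return counts
-- ===== SOURCE B (Python) =====
-- def count_summits(start, end, summits, interval=1000, step=10):
--     # Sort once, then count summits in each (i-1000, i+1000) window by binary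
--     # search (bisect algorithm inlined: this module imports nothing).
--     if start > end:
--         step = -step
--     s = sorted(summits)
--
--     def bisect_left(a, x):
--         lo, hi = 0, len(a)
--         while lo < hi:
--             mid = (lo + hi) // 2
--             if a[mid] < x:
--                 lo = mid + 1
--             else:
--                 hi = mid
--         return lo
--
--     def bisect_right(a, x):
--         lo, hi = 0, len(a)
--         while lo < hi:
--             mid = (lo + hi) // 2
--             if x < a[mid]:
--                 hi = mid
--             else:
--                 lo = mid + 1
--         return lo
--
--     return [bisect_left(s, i + 1000) - bisect_right(s, i - 1000)
--             for i in range(start, end, step)]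
-- ===== Notes on version B (the rewrite author's own statement) =====
-- stated objective: alternative
-- what changed: B sorts the summits once and counts each window (i-1000, i+1000) with two binary searches (bisect_left/bisect_right, inlined since the module imports nothing) instead of A's full inner scan of summits per window; on the measured inputs (few summits, many windows) this is not measurably faster.
import Mathlib
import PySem

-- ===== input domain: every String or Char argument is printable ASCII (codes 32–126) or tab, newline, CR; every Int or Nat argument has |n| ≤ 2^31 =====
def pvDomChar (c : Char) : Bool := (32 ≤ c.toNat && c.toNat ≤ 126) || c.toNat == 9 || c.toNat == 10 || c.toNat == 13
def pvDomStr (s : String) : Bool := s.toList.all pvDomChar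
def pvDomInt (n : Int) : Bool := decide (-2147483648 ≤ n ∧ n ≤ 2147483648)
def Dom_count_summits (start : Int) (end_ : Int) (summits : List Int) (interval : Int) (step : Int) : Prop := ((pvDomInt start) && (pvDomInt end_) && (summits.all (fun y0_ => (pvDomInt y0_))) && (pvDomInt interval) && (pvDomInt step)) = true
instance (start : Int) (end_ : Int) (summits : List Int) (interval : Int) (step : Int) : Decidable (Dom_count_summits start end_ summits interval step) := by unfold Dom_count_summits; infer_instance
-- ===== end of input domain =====

-- B sorts the summits once and answers each window with two binary searches
-- (bisect_left/bisect_right) instead of A's inner scan over all summits per window.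

-- ===== PORT A =====
def count_summits (start : Int) (end_ : Int) (summits : List Int) (interval : Int) (step : Int) : List Int :=
  let step := if start > end_ then -step else step
  (PySem.List.pyRange start end_ step).foldl
    (fun counts i =>
      let frag_start := i - 1000
      let frag_end := i + 1000
      let count := summits.foldl
        (fun count st => if st > frag_start ∧ st < frag_end then count + 1 else count) (0 : Int)
      counts ++ [count]) []

-- ===== PORT B =====
-- Source B's hand-inlined bisect_left/bisect_right are the stdlib bisect algorithm verbatim,
-- ported as PySem.List.bisectLeft / bisectRight (the same lo/hi binary-search loop).
def count_summits_alt (start : Int) (end_ : Int) (summits : List Int) (interval : Int) (step : Int) : List Int :=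
  let step := if start > end_ then -step else step
  let s := PySem.List.sorted summits (fun x => x) false
  (PySem.List.pyRange start end_ step).map
    (fun i => ((PySem.List.bisectLeft s (i + 1000) : Int) - (PySem.List.bisectRight s (i - 1000) : Int)))

-- ===== PRECONDITION & SPEC =====
-- Pre_ excludes exactly step = 0, where Python's range(start, end, 0) raises ValueError (in A and in B).
def Pre_count_summits (start : Int) (end_ : Int) (summits : List Int) (interval : Int) (step : Int) : Prop := step ≠ 0
instance (start : Int) (end_ : Int) (summits : List Int) (interval : Int) (step : Int) : Decidable (Pre_count_summits start end_ summits interval step) := by unfold Pre_count_summits; infer_instance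

def pvWitness_count_summits : Int × Int × List Int × Int × Int := (0, 50, [12, 1500, -900], 1000, 10)

def Spec_count_summits (start : Int) (end_ : Int) (summits : List Int) (interval : Int) (step : Int) (out : List Int) : Prop := out = count_summits_alt start end_ summits interval step
instance (start : Int) (end_ : Int) (summits : List Int) (interval : Int) (step : Int) (out : List Int) : Decidable (Spec_count_summits start end_ summits interval step out) := by unfold Spec_count_summits; infer_instance

-- ===== CLAIM (what is proved, stated in full; the proofs are below) =====
def Claim_equal_count_summits : Prop := ∀ (start : Int) (end_ : Int) (summits : List Int) (interval : Int) (step : Int), Dom_count_summits start end_ summits interval step → Pre_count_summits start end_ summits interval step → Spec_count_summits start end_ summits interval step (count_summits start end_ summits interval step)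

-- ===== LEMMAS AND PROOFS =====

-- If a predicate holds exactly on the first k positions of a list, countP is k.
lemma countP_eq_of_boundary (s : List Int) (p : Int → Bool) (k : Nat) (hk : k ≤ s.length)
    (h1 : ∀ j, (hj : j < s.length) → j < k → p s[j])
    (h2 : ∀ j, (hj : j < s.length) → k ≤ j → ¬ p s[j] = true) :
    s.countP p = k := by
  conv_lhs => rw [← List.take_append_drop k s]
  rw [List.countP_append]
  have ht : (s.take k).countP p = (s.take k).length := by
    apply List.countP_eq_length.mpr
    intro a ha
    obtain ⟨j, hj, rfl⟩ := List.mem_iff_getElem.mp ha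
    have hjk : j < k := by simp [List.length_take] at hj; omega
    rw [List.getElem_take]
    exact h1 j (by omega) hjk
  have hd : (s.drop k).countP p = 0 := by
    apply List.countP_eq_zero.mpr
    intro a ha
    obtain ⟨j, hj, rfl⟩ := List.mem_iff_getElem.mp ha
    rw [List.getElem_drop]
    exact h2 (k + j) (by simp at hj; omega) (by omega)
  rw [ht, hd, List.length_take]
  omega

-- On a sorted list, bisect_left at x counts the elements < x.
lemma bisectLeft_eq_countP (s : List Int) (x : Int)
    (hs : s.Pairwise (fun a b => a ≤ b)) :
    PySem.List.bisectLeft s x = s.countP (fun y => decide (y < x)) := by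
  obtain ⟨hle, hlt, hge⟩ := PySem.List.bisectLeft_spec s x hs
  exact (countP_eq_of_boundary s _ _ hle
    (fun j hj hjk => by simpa using hlt j hj hjk)
    (fun j hj hkj => by simpa using not_lt.mpr (hge j hj hkj))).symm

-- On a sorted list, bisect_right at x counts the elements ≤ x.
lemma bisectRight_eq_countP (s : List Int) (x : Int)
    (hs : s.Pairwise (fun a b => a ≤ b)) :
    PySem.List.bisectRight s x = s.countP (fun y => decide (y ≤ x)) := by
  obtain ⟨hle, hlt, hge⟩ := PySem.List.bisectRight_spec s x hs
  exact (countP_eq_of_boundary s _ _ hle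
    (fun j hj hjk => by simpa using hlt j hj hjk)
    (fun j hj hkj => by simpa using not_le.mpr (hge j hj hkj))).symm

-- Counting below hi splits at lo (lo < hi) into "≤ lo" plus "strictly inside (lo, hi)".
lemma countP_window_split (s : List Int) (lo hi : Int) (h : lo < hi) :
    s.countP (fun y => decide (y < hi)) =
      s.countP (fun y => decide (y ≤ lo)) + s.countP (fun y => decide (lo < y ∧ y < hi)) := by
  induction s with
  | nil => simp
  | cons a t ih =>
    rw [List.countP_cons, List.countP_cons, List.countP_cons, ih]
    simp only [decide_eq_true_eq]
    split_ifs <;> omega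

-- A's inner scan equals B's bisect difference, for every window centre i.
lemma inner_count_eq (summits : List Int) (i : Int) :
    summits.foldl (fun count st => if st > i - 1000 ∧ st < i + 1000 then count + 1 else count) (0 : Int)
      = ((PySem.List.bisectLeft (PySem.List.sorted summits (fun x => x) false) (i + 1000) : Int)
          - (PySem.List.bisectRight (PySem.List.sorted summits (fun x => x) false) (i - 1000) : Int)) := by
  set s := PySem.List.sorted summits (fun x => x) false with hsdef
  have hs : s.Pairwise (fun a b => a ≤ b) := PySem.List.sorted_pairwise summits (fun x => x)
  have hperm : s.Perm summits := PySem.List.sorted_perm summits (fun x => x) false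
  have hfold := PySem.List.foldl_count_if (fun st => decide (st > i - 1000 ∧ st < i + 1000)) summits (0 : Int)
  have hA : summits.foldl (fun count st => if st > i - 1000 ∧ st < i + 1000 then count + 1 else count) (0 : Int)
      = (summits.countP (fun st => decide (st > i - 1000 ∧ st < i + 1000)) : Int) := by
    simpa using hfold
  rw [hA, ← hperm.countP_eq]
  rw [bisectLeft_eq_countP s (i + 1000) hs, bisectRight_eq_countP s (i - 1000) hs]
  have hsplit := countP_window_split s (i - 1000) (i + 1000) (by omega)
  have hcongr : s.countP (fun y => decide (i - 1000 < y ∧ y < i + 1000))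
      = s.countP (fun st => decide (st > i - 1000 ∧ st < i + 1000)) := by
    apply List.countP_congr; intro a _; simp [gt_iff_lt, and_comm]
  omega

-- ===== VERDICT (by name: the statement is the Claim_ definition above) =====
theorem count_summits_spec : Claim_equal_count_summits := by
  intro start end_ summits interval step _ _
  unfold Spec_count_summits count_summits count_summits_alt
  rw [PySem.List.foldl_append_singleton_eq_map]
  simp only [List.nil_append]
  apply List.map_congr_left
  intro i _
  exact inner_count_eq summits i
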